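-- pv_equiv track=rewrite | github.com/maxjerdee/superconformal-casimirs | casimir_functions.py | fermionic_order
-- ===== SOURCE A (Python) =====
-- bosonic_num = 0
--
-- def fermionic_order(index_list): # Given the tuple of indices, determine the
-- 	ferm_indices = [i for i in index_list if i >= bosonic_num]
-- 	sign = 1
-- 	for i in range(len(ferm_indices)):
-- 		for j in range(i+1,len(ferm_indices)):
-- 			if ferm_indices[i] > ferm_indices[j]:
-- 				sign *= -1
-- 			elif ferm_indices[i] == ferm_indices[j]:
-- 				sign = 0
-- 	return sign
-- ===== SOURCE B (Python) =====
-- bosonic_num = 0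
--
-- def fermionic_order(index_list):
--     ferm = [i for i in index_list if i >= bosonic_num]
--     if len(set(ferm)) != len(ferm):
--         return 0
--     def sort_count(a):
--         n = len(a)
--         if n <= 1:
--             return a, 0
--         left, cl = sort_count(a[:n // 2])
--         right, cr = sort_count(a[n // 2:])
--         merged = []
--         i = j = inv = 0
--         while i < len(left) and j < len(right):
--             if left[i] <= right[j]:
--                 merged.append(left[i]); i += 1
--             else:
--                 inv += len(left) - i
--                 merged.append(right[j]); j += 1
--         merged.extend(left[i:]); merged.extend(right[j:])
--         return merged, cl + cr + inv
--     _, inv = sort_count(ferm)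
--     return 1 - 2 * (inv % 2)
-- ===== Notes on version B (the rewrite author's own statement) =====
-- stated objective: faster
-- what changed: Replaces A's quadratic nested-loop pairwise sign accumulation with duplicate detection via a set plus merge-sort inversion counting, returning 0 on a duplicate and (-1)^inversions otherwise.
import Mathlib
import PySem

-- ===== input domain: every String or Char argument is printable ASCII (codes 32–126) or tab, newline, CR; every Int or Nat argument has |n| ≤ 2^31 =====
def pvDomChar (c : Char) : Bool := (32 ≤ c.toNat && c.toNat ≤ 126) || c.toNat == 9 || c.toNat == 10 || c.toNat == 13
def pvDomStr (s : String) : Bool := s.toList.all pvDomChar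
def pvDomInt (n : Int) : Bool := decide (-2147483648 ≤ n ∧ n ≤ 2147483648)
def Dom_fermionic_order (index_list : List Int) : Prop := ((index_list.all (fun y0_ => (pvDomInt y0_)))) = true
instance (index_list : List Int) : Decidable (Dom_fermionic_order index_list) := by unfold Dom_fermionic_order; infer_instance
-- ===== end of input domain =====

-- B replaces A's quadratic pairwise sign loop by duplicate detection via a set plus
-- merge-sort inversion counting (parity), an asymptotically faster algorithm.

def bosonic_num : Int := 0

-- ===== PORT A =====
def fermionic_order (index_list : List Int) : Int :=
  let ferm_indices := index_list.filter (fun i => bosonic_num ≤ i)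
  (PySem.List.pyRange 0 (ferm_indices.length : Int) 1).foldl (fun sign i =>
    (PySem.List.pyRange (i + 1) (ferm_indices.length : Int) 1).foldl (fun sign j =>
      if PySem.List.pyGetD ferm_indices i 0 > PySem.List.pyGetD ferm_indices j 0 then
        sign * (-1)
      else if PySem.List.pyGetD ferm_indices i 0 = PySem.List.pyGetD ferm_indices j 0 then
        0
      else sign) sign) 1

-- ===== PORT B =====
-- the merge step of Source B's sort_count: while loop → structural recursion, extend → base cases
def pvMerge : List Int → List Int → List Int × Int
  | [], r => (r, 0)
  | x :: l, [] => (x :: l, 0)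
  | x :: l, y :: r =>
    if x ≤ y then
      let m := pvMerge l (y :: r)
      (x :: m.1, m.2)
    else
      let m := pvMerge (x :: l) r
      (y :: m.1, m.2 + ((x :: l).length : Int))

-- Source B's sort_count: split in halves, recurse, merge while counting cross inversions
def pvSortCount (a : List Int) : List Int × Int :=
  if a.length ≤ 1 then (a, 0)
  else
    let L := pvSortCount (a.take (a.length / 2))
    let R := pvSortCount (a.drop (a.length / 2))
    let m := pvMerge L.1 R.1
    (m.1, L.2 + R.2 + m.2)
termination_by a.length
decreasing_by
  · simp only [List.length_take]; omega
  · simp only [List.length_drop]; omega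

def fermionic_order_alt (index_list : List Int) : Int :=
  let ferm := index_list.filter (fun i => bosonic_num ≤ i)
  if (PySem.Set.ofList ferm).length ≠ ferm.length then 0
  else 1 - 2 * PySem.Int.mod (pvSortCount ferm).2 2

-- ===== PRECONDITION & SPEC =====
def Spec_fermionic_order (index_list : List Int) (out : Int) : Prop := out = fermionic_order_alt index_list
instance (index_list : List Int) (out : Int) : Decidable (Spec_fermionic_order index_list out) := by unfold Spec_fermionic_order; infer_instance

-- ===== CLAIM (what is proved, stated in full; the proofs are below) =====
def Claim_equal_fermionic_order : Prop := ∀ (index_list : List Int), Dom_fermionic_order index_list → Spec_fermionic_order index_list (fermionic_order index_list)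

-- ===== LEMMAS AND PROOFS =====

-- number of y in t with x > y
def cntGt (x : Int) (t : List Int) : Nat := t.countP (fun y => decide (x > y))

-- inversion count of a list (pairs i < j with l[i] > l[j])
def invN : List Int → Nat
  | [] => 0
  | x :: t => cntGt x t + invN t

-- cross inversions between two lists
def crossN (l r : List Int) : Nat := (l.map (fun x => cntGt x r)).sum

-- A's inner-loop step and the sign of a list
def stepA (x s y : Int) : Int := if x > y then s * (-1) else if x = y then 0 else s

def signOf : List Int → Int
  | [] => 1
  | x :: t => (t.foldl (stepA x) 1) * signOf t

theorem stepA_mul (x s y : Int) : stepA x s y = s * stepA x 1 y := by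
  unfold stepA; split_ifs <;> ring

theorem foldl_stepA_mul (x : Int) (t : List Int) (s : Int) :
    t.foldl (stepA x) s = s * t.foldl (stepA x) 1 := by
  induction t generalizing s with
  | nil => simp
  | cons y t ih =>
    simp only [List.foldl_cons]
    rw [ih (stepA x s y), ih (stepA x 1 y), stepA_mul x s y]
    ring

theorem foldl_stepA_one (x : Int) (t : List Int) :
    t.foldl (stepA x) 1 = if x ∈ t then 0 else (-1 : Int) ^ cntGt x t := by
  induction t with
  | nil => simp [cntGt]
  | cons y t ih =>
    simp only [List.foldl_cons]
    rw [foldl_stepA_mul, ih]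
    unfold stepA cntGt
    by_cases hxy : x = y
    · subst hxy; simp
    · by_cases hgt : x > y
      · have : ¬ x = y := hxy
        simp only [if_pos hgt, List.mem_cons, List.countP_cons]
        by_cases hm : x ∈ t <;> simp [hm, hxy, hgt, cntGt, pow_succ] <;> ring
      · simp only [if_neg hgt, if_neg hxy, List.mem_cons, List.countP_cons]
        by_cases hm : x ∈ t <;> simp [hm, hxy, hgt, cntGt]

theorem signOf_eq (l : List Int) :
    signOf l = if l.Nodup then (-1 : Int) ^ invN l else 0 := by
  induction l with
  | nil => simp [signOf, invN]
  | cons x t ih =>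
    simp only [signOf, List.nodup_cons, invN]
    rw [foldl_stepA_one, ih]
    by_cases hm : x ∈ t
    · simp [hm]
    · by_cases hn : t.Nodup <;> simp [hm, hn, pow_add]

-- A's double index loop over pyRange computes signOf of the suffix
theorem loopA (l : List Int) (k : Nat) (s : Int) :
    (PySem.List.pyRange (k : Int) (l.length : Int) 1).foldl (fun sign i =>
      (PySem.List.pyRange (i + 1) (l.length : Int) 1).foldl (fun sign j =>
        stepA (PySem.List.pyGetD l i 0) sign (PySem.List.pyGetD l j 0)) sign) s
    = s * signOf (l.drop k) := by
  by_cases hk : k < l.length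
  · rw [PySem.List.pyRange_one_cons (by exact_mod_cast hk)]
    simp only [List.foldl_cons]
    have hd : l.drop k = l[k] :: l.drop (k + 1) := List.drop_eq_getElem_cons hk
    have hget : PySem.List.pyGetD l (k : Int) 0 = l[k] := by
      rw [PySem.List.pyGetD_natCast]; exact List.getD_eq_getElem l 0 hk
    have hcast : ((k : Int) + 1) = ((k + 1 : Nat) : Int) := by push_cast; ring
    have hinner : ∀ (s' : Int),
        (PySem.List.pyRange ((k : Int) + 1) (l.length : Int) 1).foldl (fun sign j =>
          stepA (PySem.List.pyGetD l (k : Int) 0) sign (PySem.List.pyGetD l j 0)) s'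
        = (l.drop (k + 1)).foldl (stepA l[k]) s' := by
      intro s'
      rw [hcast, hget]
      have h2 := PySem.List.foldl_pyRange_pyGetD (xs := l) (a := ((k + 1 : Nat) : Int))
        (d := 0) (f := stepA l[k]) (init := s') (by positivity)
      simp only [PySem.List.len_eq, Int.toNat_natCast] at h2
      exact h2
    rw [hinner s]
    have ih := loopA l (k + 1) ((l.drop (k + 1)).foldl (stepA l[k]) s)
    rw [hcast, ih, hd]
    simp only [signOf]
    rw [foldl_stepA_mul]
    ring
  · rw [PySem.List.pyRange_one_eq_nil (by exact_mod_cast Nat.le_of_not_lt hk)]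
    rw [List.drop_eq_nil_of_le (Nat.le_of_not_lt hk)]
    simp [signOf]
termination_by l.length - k

-- A computes: 0 on a duplicate, otherwise the parity of inversions
theorem fermionic_order_eq (index_list : List Int) :
    fermionic_order index_list =
      (if (index_list.filter (fun i => bosonic_num ≤ i)).Nodup
       then (-1 : Int) ^ invN (index_list.filter (fun i => bosonic_num ≤ i)) else 0) := by
  simp only [fermionic_order]
  have h := loopA (index_list.filter (fun i => bosonic_num ≤ i)) 0 1
  simp only [Nat.cast_zero, stepA] at h
  rw [h, signOf_eq]
  simp

-- ===== B-side lemmas =====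

theorem cntGt_append (x : Int) (l r : List Int) :
    cntGt x (l ++ r) = cntGt x l + cntGt x r := by
  unfold cntGt; simp [List.countP_append]

theorem invN_append (l r : List Int) :
    invN (l ++ r) = invN l + invN r + crossN l r := by
  induction l with
  | nil => simp [invN, crossN]
  | cons x l ih =>
    simp only [List.cons_append, invN, cntGt_append, crossN, List.map_cons, List.sum_cons] at *
    omega

theorem crossN_perm_left {l l' : List Int} (r : List Int) (h : l.Perm l') :
    crossN l r = crossN l' r := by
  unfold crossN; exact (h.map _).sum_eq

theorem crossN_perm_right (l : List Int) {r r' : List Int} (h : r.Perm r') :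
    crossN l r = crossN l r' := by
  unfold crossN
  congr 1
  apply List.map_congr_left
  intro x _
  unfold cntGt
  exact h.countP_eq _

theorem crossN_cons_right (l : List Int) (y : Int) (r : List Int) :
    crossN l (y :: r) = l.countP (fun x => decide (x > y)) + crossN l r := by
  induction l with
  | nil => simp [crossN]
  | cons x l ih =>
    have hh : cntGt x (y :: r) = (if x > y then 1 else 0) + cntGt x r := by
      unfold cntGt; rw [List.countP_cons]; by_cases h : x > y <;> simp [h] <;> omega
    simp only [crossN, List.map_cons, List.sum_cons] at ih ⊢
    rw [hh, ih, List.countP_cons]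
    by_cases h : x > y
    · simp [h]
      omega
    · simp [h]
      omega

-- merge of two sorted lists: permutation, sortedness, and exact cross-inversion count
theorem pvMerge_spec : ∀ (l r : List Int), l.Pairwise (· ≤ ·) → r.Pairwise (· ≤ ·) →
    (pvMerge l r).1.Perm (l ++ r) ∧ (pvMerge l r).1.Pairwise (· ≤ ·) ∧
    (pvMerge l r).2 = (crossN l r : Int)
  | [], r, _, hr => by simp [pvMerge, crossN, hr]
  | x :: l, [], hl, _ => by simp [pvMerge, crossN, cntGt, hl]
  | x :: l, y :: r, hl, hr => by
    by_cases hxy : x ≤ y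
    · have ih := pvMerge_spec l (y :: r) (hl.sublist (List.sublist_cons_self x l)) hr
      obtain ⟨hp, hs, hc⟩ := ih
      refine ⟨?_, ?_, ?_⟩
      · simp only [pvMerge, if_pos hxy]
        exact (hp.cons x).trans (by simp)
      · simp only [pvMerge, if_pos hxy]
        rw [List.pairwise_cons]
        refine ⟨?_, hs⟩
        intro z hz
        have hz' : z ∈ l ++ y :: r := hp.mem_iff.mp hz
        rcases List.mem_append.mp hz' with h1 | h2
        · exact List.rel_of_pairwise_cons hl h1
        · rcases List.mem_cons.mp h2 with rfl | h3
          · exact hxy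
          · exact le_trans hxy (List.rel_of_pairwise_cons hr h3)
      · simp only [pvMerge, if_pos hxy]
        rw [hc]
        congr 1
        have hzero : cntGt x (y :: r) = 0 := by
          unfold cntGt
          rw [List.countP_eq_zero]
          intro z hz
          rcases List.mem_cons.mp hz with rfl | h3
          · simp; omega
          · have := List.rel_of_pairwise_cons hr h3
            simp; omega
        simp only [crossN, List.map_cons, List.sum_cons, hzero, Nat.zero_add]
    · have hx : y < x := lt_of_not_ge hxy
      have ih := pvMerge_spec (x :: l) r hl (hr.sublist (List.sublist_cons_self y r))
      obtain ⟨hp, hs, hc⟩ := ih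
      refine ⟨?_, ?_, ?_⟩
      · simp only [pvMerge, if_neg hxy]
        refine (hp.cons y).trans ?_
        have : (y :: (x :: l ++ r)).Perm ((x :: l) ++ (y :: r)) := by
          simpa using (List.perm_middle (a := y) (l₁ := x :: l) (l₂ := r)).symm
        simpa using this
      · simp only [pvMerge, if_neg hxy]
        rw [List.pairwise_cons]
        refine ⟨?_, hs⟩
        intro z hz
        have hz' : z ∈ (x :: l) ++ r := hp.mem_iff.mp hz
        rcases List.mem_append.mp hz' with h1 | h2
        · rcases List.mem_cons.mp h1 with rfl | h3
          · exact le_of_lt hx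
          · exact le_trans (le_of_lt hx) (List.rel_of_pairwise_cons hl h3)
        · exact List.rel_of_pairwise_cons hr h2
      · simp only [pvMerge, if_neg hxy]
        rw [hc]
        rw [crossN_cons_right]
        have hall : (x :: l).countP (fun z => decide (z > y)) = (x :: l).length := by
          rw [List.countP_eq_length]
          intro z hz
          rcases List.mem_cons.mp hz with rfl | h3
          · simp; omega
          · have := List.rel_of_pairwise_cons hl h3
            simp; omega
        rw [hall]
        push_cast
        ring

-- sort_count: permutation, sortedness, and exact inversion count
theorem pvSortCount_spec (a : List Int) :
    (pvSortCount a).1.Perm a ∧ (pvSortCount a).1.Pairwise (· ≤ ·) ∧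
    (pvSortCount a).2 = (invN a : Int) := by
  by_cases h : a.length ≤ 1
  · rw [pvSortCount, if_pos h]
    refine ⟨List.Perm.refl a, ?_, ?_⟩
    · match a, h with
      | [], _ => simp
      | [x], _ => simp
    · match a, h with
      | [], _ => simp [invN]
      | [x], _ => simp [invN, cntGt]
  · have ihL := pvSortCount_spec (a.take (a.length / 2))
    have ihR := pvSortCount_spec (a.drop (a.length / 2))
    obtain ⟨pL, sL, cL⟩ := ihL
    obtain ⟨pR, sR, cR⟩ := ihR
    obtain ⟨pm, sm, cm⟩ := pvMerge_spec _ _ sL sR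
    rw [pvSortCount, if_neg h]
    refine ⟨?_, sm, ?_⟩
    · exact pm.trans ((pL.append pR).trans (List.Perm.of_eq (List.take_append_drop _ a)))
    · simp only [cm, cL, cR]
      have hcross : crossN (pvSortCount (a.take (a.length / 2))).1
          (pvSortCount (a.drop (a.length / 2))).1
          = crossN (a.take (a.length / 2)) (a.drop (a.length / 2)) := by
        rw [crossN_perm_left _ pL, crossN_perm_right _ pR]
      rw [hcross]
      have := invN_append (a.take (a.length / 2)) (a.drop (a.length / 2))
      rw [List.take_append_drop] at this
      rw [this]
      push_cast
      ring
termination_by a.length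
decreasing_by
  · simp only [List.length_take]; omega
  · simp only [List.length_drop]; omega

-- len(set(xs)) == len(xs) iff xs has no duplicates
theorem ofList_length_eq_iff (xs : List Int) :
    (PySem.Set.ofList xs).length = xs.length ↔ xs.Nodup := by
  have hperm : (PySem.Set.ofList xs).Perm xs.dedup := by
    rw [List.perm_ext_iff_of_nodup (PySem.Set.nodup_ofList xs) (List.nodup_dedup xs)]
    intro a
    rw [PySem.Set.mem_ofList, List.mem_dedup]
  rw [hperm.length_eq]
  constructor
  · intro h
    have hsub := List.dedup_sublist xs
    have := hsub.eq_of_length h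
    exact List.dedup_eq_self.mp this
  · intro h
    rw [List.dedup_eq_self.mpr h]

theorem parity_formula (n : Nat) :
    (1 : Int) - 2 * PySem.Int.mod (n : Int) 2 = (-1 : Int) ^ n := by
  have hm : PySem.Int.mod (n : Int) 2 = (n : Int) % 2 := by
    simp [PySem.Int.mod, Int.fmod_eq_emod]
  rw [hm]
  rcases Nat.even_or_odd n with he | ho
  · rw [he.neg_one_pow]
    obtain ⟨k, hk⟩ := he
    subst hk
    push_cast
    omega
  · rw [ho.neg_one_pow]
    obtain ⟨k, hk⟩ := ho
    subst hk
    push_cast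
    omega

-- ===== VERDICT (by name: the statement is the Claim_ definition above) =====
theorem fermionic_order_spec : Claim_equal_fermionic_order := by
  intro index_list _
  unfold Spec_fermionic_order
  rw [fermionic_order_eq]
  unfold fermionic_order_alt
  set ferm := index_list.filter (fun i => bosonic_num ≤ i) with hferm
  obtain ⟨-, -, hc⟩ := pvSortCount_spec ferm
  by_cases hn : ferm.Nodup
  · rw [if_pos hn, if_neg (by simp [ofList_length_eq_iff, hn])]
    rw [hc, parity_formula]
  · rw [if_neg hn, if_pos (by simp [ofList_length_eq_iff, hn])]
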